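-- pv_equiv track=rewrite | github.com/christosgalaios/NeuralStack | agents/validation.py | _add_inline_citations
-- ===== SOURCE A (Python) =====
-- def _add_inline_citations(content: str) -> str:
--     """
--     Naive "citation" injection: append contextual reference hints to
--     some headings. These are not external links, but cues for future
--     manual curation.
--     """
--     replacements = {
--         # devtools_comparison headings
--         "## Head-to-head feature comparison": "## Head-to-head feature comparison [internal notes]",
--         "## Common failure modes": "## Common failure modes [field experience]",
--         # compatibility headings
--         "## Known issues and workarounds": "## Known issues and workarounds [internal notes]",
--         "## Tested version matrix": "## Tested version matrix [field experience]",
--         # tutorial headings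
--         "## Common errors and how to fix them": "## Common errors and how to fix them [internal notes]",
--         # foreign_news headings
--         "## Technical analysis": "## Technical analysis [internal notes]",
--         # legacy headings (kept for backwards compatibility with existing articles)
--         "## Core concepts and mental models": "## Core concepts and mental models [internal notes]",
--         "## Implementation guidelines and failure modes": "## Implementation guidelines and failure modes [field experience]",
--     }
--     for old, new in replacements.items():
--         content = content.replace(old, new)
--     return content
-- ===== SOURCE B (Python) =====
-- import re
--
-- _REPLACEMENTS = {
--     "## Head-to-head feature comparison": "## Head-to-head feature comparison [internal notes]",
--     "## Common failure modes": "## Common failure modes [field experience]",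
--     "## Known issues and workarounds": "## Known issues and workarounds [internal notes]",
--     "## Tested version matrix": "## Tested version matrix [field experience]",
--     "## Common errors and how to fix them": "## Common errors and how to fix them [internal notes]",
--     "## Technical analysis": "## Technical analysis [internal notes]",
--     "## Core concepts and mental models": "## Core concepts and mental models [internal notes]",
--     "## Implementation guidelines and failure modes": "## Implementation guidelines and failure modes [field experience]",
-- }
--
-- _PATTERN = re.compile("|".join(re.escape(k) for k in _REPLACEMENTS))
--
--
-- def _add_inline_citations(content: str) -> str:
--     """Single left-to-right pass: one alternation regex over all known
--     headings, each match replaced via the dict."""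
--     return _PATTERN.sub(lambda m: _REPLACEMENTS[m.group(0)], content)
-- ===== Notes on version B (the rewrite author's own statement) =====
-- stated objective: alternative
-- what changed: Replaces eight sequential str.replace passes over the whole content with a single compiled alternation regex and one re.sub pass that maps each matched heading to its replacement via the dict.
import Mathlib
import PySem

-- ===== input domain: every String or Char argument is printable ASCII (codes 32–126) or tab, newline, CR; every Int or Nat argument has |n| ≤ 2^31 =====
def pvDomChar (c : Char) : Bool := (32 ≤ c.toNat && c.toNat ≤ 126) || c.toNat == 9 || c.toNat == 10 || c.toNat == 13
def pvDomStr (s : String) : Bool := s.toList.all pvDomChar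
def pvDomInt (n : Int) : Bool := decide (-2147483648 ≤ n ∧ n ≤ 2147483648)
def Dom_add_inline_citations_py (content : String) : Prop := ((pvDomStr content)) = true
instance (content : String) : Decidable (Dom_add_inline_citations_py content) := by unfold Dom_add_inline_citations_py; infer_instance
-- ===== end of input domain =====

-- B replaces A's eight sequential str.replace passes by ONE left-to-right pass (a compiled
-- alternation regex with re.sub in Python, ported as a single scanner over the rule list);
-- objective: alternative (same cost class, genuinely different traversal).

-- ===== PORT A =====
-- literal transliteration of A: eight sequential content.replace(old, new) passes, dict order
def add_inline_citations_py (content : String) : String :=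
  let content := PySem.Str.replace content "## Head-to-head feature comparison" "## Head-to-head feature comparison [internal notes]"
  let content := PySem.Str.replace content "## Common failure modes" "## Common failure modes [field experience]"
  let content := PySem.Str.replace content "## Known issues and workarounds" "## Known issues and workarounds [internal notes]"
  let content := PySem.Str.replace content "## Tested version matrix" "## Tested version matrix [field experience]"
  let content := PySem.Str.replace content "## Common errors and how to fix them" "## Common errors and how to fix them [internal notes]"
  let content := PySem.Str.replace content "## Technical analysis" "## Technical analysis [internal notes]"
  let content := PySem.Str.replace content "## Core concepts and mental models" "## Core concepts and mental models [internal notes]"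
  let content := PySem.Str.replace content "## Implementation guidelines and failure modes" "## Implementation guidelines and failure modes [field experience]"
  content

-- ===== PORT B =====
-- the rule table of Source B (the dict, in insertion order = the regex's alternation order)
def pvRules : List (List Char × List Char) :=
  [ ("## Head-to-head feature comparison".toList, "## Head-to-head feature comparison [internal notes]".toList),
    ("## Common failure modes".toList, "## Common failure modes [field experience]".toList),
    ("## Known issues and workarounds".toList, "## Known issues and workarounds [internal notes]".toList),
    ("## Tested version matrix".toList, "## Tested version matrix [field experience]".toList),
    ("## Common errors and how to fix them".toList, "## Common errors and how to fix them [internal notes]".toList),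
    ("## Technical analysis".toList, "## Technical analysis [internal notes]".toList),
    ("## Core concepts and mental models".toList, "## Core concepts and mental models [internal notes]".toList),
    ("## Implementation guidelines and failure modes".toList, "## Implementation guidelines and failure modes [field experience]".toList) ]

-- hand port of the alternation regex's matching at one position: the first rule (alternative)
-- whose literal key matches at the front of l; exact because all alternatives are re.escape'd literals
def pvFindRule (rs : List (List Char × List Char)) (l : List Char) : Option (List Char × List Char) :=
  rs.find? (fun p => p.1.isPrefixOf l)

-- hand port of _PATTERN.sub: one left-to-right pass; at each position emit the replacement of the
-- first matching alternative and skip the match, else emit the character (exact: literal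
-- alternatives, non-overlapping leftmost matching, which is re.sub's behaviour)
def pvScan (rs : List (List Char × List Char)) : List Char → List Char
  | [] => []
  | c :: t =>
    match pvFindRule rs (c :: t) with
    | some (k, r) => r ++ pvScan rs (t.drop (k.length - 1))
    | none => c :: pvScan rs t
termination_by l => l.length
decreasing_by
  · simp only [List.length_drop, List.length_cons]; omega
  · simp

def add_inline_citations_py_alt (content : String) : String :=
  String.ofList (pvScan pvRules content.toList)

-- ===== PRECONDITION & SPEC =====
def Spec_add_inline_citations_py (content : String) (out : String) : Prop := out = add_inline_citations_py_alt content
instance (content : String) (out : String) : Decidable (Spec_add_inline_citations_py content out) := by unfold Spec_add_inline_citations_py; infer_instance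

-- ===== CLAIM (what is proved, stated in full; the proofs are below) =====
def Claim_equal_add_inline_citations_py : Prop := ∀ (content : String), Dom_add_inline_citations_py content → Spec_add_inline_citations_py content (add_inline_citations_py content)

-- ===== LEMMAS AND PROOFS =====

-- proof-side restatement of PySem.Chars.replace (nonempty pattern), in the direct recursive shape
def pvRepC (k r : List Char) : List Char → List Char
  | [] => []
  | c :: t =>
    if k.isPrefixOf (c :: t) then r ++ pvRepC k r (t.drop (k.length - 1))
    else c :: pvRepC k r t
termination_by l => l.length
decreasing_by
  · simp only [List.length_drop, List.length_cons]; omega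
  · simp

lemma pvRepC_go (k r : List Char) (hk : k ≠ []) :
    ∀ (fuel : Nat) (l acc : List Char), l.length ≤ fuel →
      PySem.Chars.replace.go k r fuel l acc = acc.reverse ++ pvRepC k r l := by
  intro fuel
  induction fuel with
  | zero =>
    intro l acc hl
    have : l = [] := List.length_eq_zero_iff.mp (Nat.le_zero.mp hl)
    subst this
    simp [PySem.Chars.replace.go, pvRepC]
  | succ n ih =>
    intro l acc hl
    match l with
    | [] => simp [PySem.Chars.replace.go, pvRepC]
    | c :: t =>
      rw [PySem.Chars.replace.go]
      by_cases hpre : k.isPrefixOf (c :: t)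
      · simp only [hpre, if_true]
        obtain ⟨d, k', rfl⟩ : ∃ d k', k = d :: k' := by
          cases k with
          | nil => exact absurd rfl hk
          | cons d k' => exact ⟨d, k', rfl⟩
        have hdrop : List.drop (d :: k').length (c :: t) = t.drop ((d :: k').length - 1) := by
          simp [List.drop_succ_cons]
        rw [hdrop, ih _ _ (by simp only [List.length_drop]; simp only [List.length_cons] at hl; omega)]
        rw [pvRepC]
        simp [hpre]
      · simp only [hpre, if_false, Bool.false_eq_true]
        rw [ih _ _ (by simpa using Nat.le_of_succ_le_succ hl)]
        rw [pvRepC]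
        simp [hpre]

lemma pvRepC_eq (k r : List Char) (hk : k ≠ []) (s : List Char) :
    PySem.Chars.replace s k r = pvRepC k r s := by
  rw [PySem.Chars.replace]
  have : k.isEmpty = false := by cases k <;> simp_all
  rw [this]
  simpa using pvRepC_go k r hk s.length s [] le_rfl

-- mutual non-prefix: a and b disagree strictly inside both (so neither matches at the other's start,
-- whatever follows)
abbrev pvMM (a b : List Char) : Prop := ¬ a <+: b ∧ ¬ b <+: a


lemma pvMM_not_prefix_append {a b : List Char} (h : pvMM a b) (t : List Char) :
    ¬ a <+: b ++ t := by
  intro hp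
  by_cases hle : a.length ≤ b.length
  · apply h.1
    rw [List.prefix_iff_eq_take] at hp ⊢
    rwa [List.take_append_of_le_length hle] at hp
  · have hlt : b.length < a.length := by omega
    apply h.2
    obtain ⟨s, hs⟩ := hp
    rw [List.prefix_iff_eq_take]
    have : List.take b.length (b ++ t) = List.take b.length (a ++ s) := by rw [hs]
    rwa [List.take_append_of_le_length (Nat.le_of_lt hlt), List.take_left] at this

-- k never occurs as a prefix of a proper suffix of kj
abbrev pvNoSub (k kj : List Char) : Prop := ∀ m < kj.length, 1 ≤ m → ¬ k <+: kj.drop m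


-- no match of k can start inside the block x, whatever follows x
abbrev pvNMW (k x : List Char) : Prop := ∀ m < x.length, pvMM k (x.drop m)


abbrev pvGoodPair (k r kj : List Char) : Prop :=
  kj ≠ [] ∧ pvMM kj k ∧ pvNoSub k kj ∧ pvNMW k kj ∧ pvNMW kj r


abbrev pvFuseCond (k r : List Char) (rs : List (List Char × List Char)) : Prop :=
  k ≠ [] ∧ k <+: r ∧ ∀ p ∈ rs, pvGoodPair k r p.1

abbrev pvPairwiseMM (rs : List (List Char × List Char)) : Prop :=
  rs.Pairwise (fun p q => pvMM p.1 q.1)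


-- a prefix of (c :: t) decomposes it as the prefix plus what the scanner skips to
lemma pvPrefix_decomp {k : List Char} {c : Char} {t : List Char}
    (hk : k ≠ []) (h : k <+: (c :: t)) : c :: t = k ++ t.drop (k.length - 1) := by
  obtain ⟨u, hu⟩ := h
  obtain ⟨d, k', rfl⟩ : ∃ d k', k = d :: k' := by
    cases k with
    | nil => exact absurd rfl hk
    | cons d k' => exact ⟨d, k', rfl⟩
  have : t.drop ((d :: k').length - 1) = u := by
    have := congrArg (List.drop (d :: k').length) hu
    simpa [List.drop_succ_cons, List.drop_left] using this.symm
  rw [this, hu]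

-- unfolding equations for one scanner step
lemma pvScan_cons_some {rs : List (List Char × List Char)} {c : Char} {t k r : List Char}
    (h : pvFindRule rs (c :: t) = some (k, r)) :
    pvScan rs (c :: t) = r ++ pvScan rs (t.drop (k.length - 1)) := by
  rw [pvScan, h]

lemma pvScan_cons_none {rs : List (List Char × List Char)} {c : Char} {t : List Char}
    (h : pvFindRule rs (c :: t) = none) :
    pvScan rs (c :: t) = c :: pvScan rs t := by
  rw [pvScan, h]

-- the scanner with no rules copies its input
lemma pvScan_nil_rules : ∀ l : List Char, pvScan [] l = l := by
  intro l
  induction l with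
  | nil => rw [pvScan]
  | cons c t ih => rw [pvScan]; simp [pvFindRule, ih]

-- the scanner passes through a block no rule can match into
lemma pvScan_block (rs : List (List Char × List Char)) :
    ∀ (x t : List Char), (∀ m < x.length, ∀ p ∈ rs, pvMM p.1 (x.drop m)) →
      pvScan rs (x ++ t) = x ++ pvScan rs t := by
  intro x
  induction x with
  | nil => intro t _; rfl
  | cons c x' ih =>
    intro t hcond
    rw [List.cons_append, pvScan]
    have hnone : pvFindRule rs (c :: (x' ++ t)) = none := by
      rw [pvFindRule, List.find?_eq_none]
      intro p hp
      simp only [List.isPrefixOf_iff_prefix]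
      have := hcond 0 (by simp) p hp
      simpa using pvMM_not_prefix_append this t
    rw [hnone]
    show c :: pvScan rs (x' ++ t) = c :: x' ++ pvScan rs t
    rw [ih t (fun m hm p hp => by
      have := hcond (m + 1) (by simpa using Nat.succ_lt_succ hm) p hp
      simpa using this)]
    rfl

-- replacement passes through a block the pattern cannot match into
lemma pvRepC_block (k r : List Char) :
    ∀ (x t : List Char), (∀ m < x.length, pvMM k (x.drop m)) →
      pvRepC k r (x ++ t) = x ++ pvRepC k r t := by
  intro x
  induction x with
  | nil => intro t _; rfl
  | cons c x' ih =>
    intro t hcond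
    rw [List.cons_append, pvRepC]
    have hnp : k.isPrefixOf (c :: (x' ++ t)) = false := by
      rw [Bool.eq_false_iff]
      intro hb
      rw [List.isPrefixOf_iff_prefix] at hb
      have := hcond 0 (by simp)
      exact pvMM_not_prefix_append (by simpa using this) t (by simpa using hb)
    rw [hnp]
    simp only [Bool.false_eq_true, if_false]
    rw [ih t (fun m hm => by
      have := hcond (m + 1) (by simpa using Nat.succ_lt_succ hm)
      simpa using this)]
    rfl

-- the first matching rule at a position is determined by the key it matched, not by what follows
lemma pvFind_stable {rs : List (List Char × List Char)} (hp : pvPairwiseMM rs)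
    {kj rj : List Char} {t : List Char}
    (h : pvFindRule rs (kj ++ t) = some (kj, rj)) :
    ∀ Y : List Char, pvFindRule rs (kj ++ Y) = some (kj, rj) := by
  induction rs with
  | nil => simp [pvFindRule] at h
  | cons p rs' ih =>
    intro Y
    rw [pvFindRule, List.find?_cons] at h ⊢
    by_cases hb : p.1.isPrefixOf (kj ++ t)
    · simp only [hb] at h
      have hpp : p = (kj, rj) := by injection h
      subst hpp
      have : (kj, rj).1.isPrefixOf (kj ++ Y) = true := by
        rw [List.isPrefixOf_iff_prefix]; exact ⟨Y, rfl⟩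
      simp [this]
    · simp only [hb] at h
      have hmem : (kj, rj) ∈ rs' := List.mem_of_find?_eq_some h
      have hmm : pvMM p.1 kj := by
        rw [pvPairwiseMM, List.pairwise_cons] at hp
        exact hp.1 _ hmem
      have hb' : p.1.isPrefixOf (kj ++ Y) = false := by
        rw [Bool.eq_false_iff]
        intro hbb
        rw [List.isPrefixOf_iff_prefix] at hbb
        exact pvMM_not_prefix_append hmm Y hbb
      rw [hb']
      exact ih (by rw [pvPairwiseMM] at hp ⊢; exact hp.tail) h Y

-- core invariant: replacing k cannot create a new match of another key kj — any (suffix of a)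
-- key matching the output already matched the input at the same place
lemma pvGen {k r kj : List Char} (hk : k ≠ []) (hkr : k <+: r)
    (hmm : pvMM kj k) (hns : pvNoSub k kj) :
    ∀ (t : List Char) (m : Nat), kj.drop m <+: pvRepC k r t → kj.drop m <+: t := by
  intro t
  induction t with
  | nil => intro m h; simpa [pvRepC] using h
  | cons c t' ih =>
    intro m h
    by_cases hpre : k.isPrefixOf (c :: t')
    · have hpre' : k <+: (c :: t') := List.isPrefixOf_iff_prefix.mp hpre
      have hdec := pvPrefix_decomp hk hpre'
      rw [pvRepC] at h
      simp only [hpre, if_true] at h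
      obtain ⟨suf, hsuf⟩ := hkr
      rw [← hsuf, List.append_assoc] at h
      by_cases hle : (kj.drop m).length ≤ k.length
      · -- short enough to live inside k, hence inside the original occurrence
        have h2 : kj.drop m <+: k := by
          rw [List.prefix_iff_eq_take] at h ⊢
          rwa [List.take_append_of_le_length hle] at h
        rw [hdec]
        exact h2.trans ⟨_, rfl⟩
      · -- would contain k strictly inside kj: impossible
        have hlt : k.length < (kj.drop m).length := by omega
        exfalso
        have hkw : k <+: kj.drop m := by
          obtain ⟨s, hs⟩ := h
          rw [List.prefix_iff_eq_take]
          have : List.take k.length (k ++ (suf ++ pvRepC k (k ++ suf) (t'.drop (k.length - 1))))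
              = List.take k.length (kj.drop m ++ s) := by rw [hs]
          rw [List.take_left, List.take_append_of_le_length (Nat.le_of_lt hlt)] at this
          exact this
        rcases Nat.eq_zero_or_pos m with hm0 | hm1
        · subst hm0
          exact hmm.2 (by simpa using hkw)
        · have hne : kj.drop m ≠ [] := by
            intro hnil
            rw [hnil] at hlt
            simp at hlt
          have hmlt : m < kj.length := by
            by_contra hge
            exact hne (List.drop_eq_nil_of_le (Nat.le_of_not_lt hge))
          exact hns m hmlt hm1 hkw
    · rw [pvRepC] at h
      simp only [hpre, Bool.false_eq_true, if_false] at h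
      cases hw : kj.drop m with
      | nil => simp
      | cons d w =>
        rw [hw] at h
        rw [List.cons_prefix_cons] at h
        obtain ⟨rfl, hwp⟩ := h
        have hw' : kj.drop (m + 1) = w := by
          have := congrArg (List.drop 1) hw
          simpa [List.drop_drop, Nat.add_comm] using this
        have := ih (m + 1) (by rw [hw']; exact hwp)
        rw [hw'] at this
        exact List.cons_prefix_cons.mpr ⟨rfl, this⟩

-- THE FUSION LEMMA: one more sequential replace before a scan = the scan with that rule
-- tried first (under the concrete structural side conditions of our rule table)
lemma pvFuse {k r : List Char} {rs : List (List Char × List Char)}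
    (hc : pvFuseCond k r rs) (hp : pvPairwiseMM rs) :
    ∀ l : List Char, pvScan rs (pvRepC k r l) = pvScan ((k, r) :: rs) l := by
  obtain ⟨hk, hkr, hgood⟩ := hc
  suffices H : ∀ (n : Nat) (l : List Char), l.length ≤ n →
      pvScan rs (pvRepC k r l) = pvScan ((k, r) :: rs) l by
    intro l; exact H l.length l le_rfl
  intro n
  induction n with
  | zero =>
    intro l hl
    have : l = [] := List.length_eq_zero_iff.mp (Nat.le_zero.mp hl)
    subst this
    simp [pvRepC, pvScan]
  | succ n ih =>
    intro l hl
    match l with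
    | [] => simp [pvRepC, pvScan]
    | c :: t =>
      by_cases hpre : k.isPrefixOf (c :: t)
      · -- k matches here: the new rule fires first in the fused scan
        rw [pvRepC]
        simp only [hpre, if_true]
        have hblock : ∀ m < r.length, ∀ p ∈ rs, pvMM p.1 (r.drop m) := by
          intro m hm p hp'
          exact (hgood p hp').2.2.2.2 m hm
        rw [pvScan_block rs r _ hblock]
        rw [ih _ (by simp only [List.length_drop]; simp only [List.length_cons] at hl; omega)]
        have hfind : pvFindRule ((k, r) :: rs) (c :: t) = some (k, r) := by
          rw [pvFindRule, List.find?_cons]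
          simp [hpre]
        rw [pvScan_cons_some hfind]
      · -- k does not match here
        have hstep : pvRepC k r (c :: t) = c :: pvRepC k r t := by
          rw [pvRepC]; simp [hpre]
        cases hfind : pvFindRule rs (c :: t) with
        | some pr =>
          obtain ⟨kj, rj⟩ := pr
          have hmem : (kj, rj) ∈ rs := List.mem_of_find?_eq_some hfind
          have hkjpre : kj <+: (c :: t) := by
            have := List.find?_some hfind
            exact List.isPrefixOf_iff_prefix.mp (by simpa using this)
          have hkjne : kj ≠ [] := (hgood _ hmem).1
          have hdec := pvPrefix_decomp hkjne hkjpre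
          -- replacement passes through the kj block
          have hrepblock : pvRepC k r (c :: t) = kj ++ pvRepC k r (t.drop (kj.length - 1)) := by
            conv_lhs => rw [hdec]
            exact pvRepC_block k r kj _ (fun m hm => (hgood _ hmem).2.2.2.1 m hm)
          rw [hrepblock]
          -- find is stable on the kj block
          have hfind2 : pvFindRule rs (kj ++ pvRepC k r (t.drop (kj.length - 1))) = some (kj, rj) := by
            have h0 : pvFindRule rs (kj ++ t.drop (kj.length - 1)) = some (kj, rj) := by
              rw [← hdec]; exact hfind
            exact pvFind_stable hp h0 _
          obtain ⟨d, kj', rfl⟩ : ∃ d kj', kj = d :: kj' := by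
            cases kj with
            | nil => exact absurd rfl hkjne
            | cons d kj' => exact ⟨d, kj', rfl⟩
          rw [List.cons_append] at hfind2
          rw [List.cons_append, pvScan_cons_some hfind2]
          have hdrop : (kj' ++ pvRepC k r (t.drop ((d :: kj').length - 1))).drop ((d :: kj').length - 1)
              = pvRepC k r (t.drop ((d :: kj').length - 1)) := by
            simp
          rw [hdrop]
          have hlen2 : (t.drop ((d :: kj').length - 1)).length ≤ n := by
            simp only [List.length_drop]
            simp only [List.length_cons] at hl
            omega
          rw [ih _ hlen2]
          have hfindfull : pvFindRule ((k, r) :: rs) (c :: t) = some (d :: kj', rj) := by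
            rw [pvFindRule, List.find?_cons]
            simp only [hpre]
            exact hfind
          rw [pvScan_cons_some hfindfull]
        | none =>
          rw [hstep]
          have hnone2 : pvFindRule rs (c :: pvRepC k r t) = none := by
            rw [pvFindRule, List.find?_eq_none]
            intro p hp'
            simp only [List.isPrefixOf_iff_prefix]
            intro hbad
            obtain ⟨hne, hmm, hns, _, _⟩ := hgood p hp'
            obtain ⟨d, w, hpw⟩ : ∃ d w, p.1 = d :: w := by
              cases hcase : p.1 with
              | nil => exact absurd hcase hne
              | cons d w => exact ⟨d, w, rfl⟩
            rw [hpw, List.cons_prefix_cons] at hbad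
            obtain ⟨rfl, hwp⟩ := hbad
            have hw1 : p.1.drop 1 = w := by rw [hpw]; rfl
            have := pvGen hk hkr hmm hns t 1 (by rw [hw1]; exact hwp)
            rw [hw1] at this
            have hbad2 : p.1 <+: (d :: t) := by
              rw [hpw, List.cons_prefix_cons]
              exact ⟨rfl, this⟩
            rw [pvFindRule, List.find?_eq_none] at hfind
            exact hfind p hp' (by rw [List.isPrefixOf_iff_prefix]; exact hbad2)
          rw [pvScan_cons_none hnone2]
          rw [ih _ (by simpa using Nat.le_of_succ_le_succ hl)]
          have hfindfull : pvFindRule ((k, r) :: rs) (c :: t) = none := by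
            rw [pvFindRule, List.find?_cons]
            simp only [hpre]
            exact hfind
          rw [pvScan_cons_none hfindfull]

set_option maxHeartbeats 1000000 in
lemma pvChain (l : List Char) :
    pvScan pvRules l =
      pvRepC "## Implementation guidelines and failure modes".toList "## Implementation guidelines and failure modes [field experience]".toList
      (pvRepC "## Core concepts and mental models".toList "## Core concepts and mental models [internal notes]".toList
      (pvRepC "## Technical analysis".toList "## Technical analysis [internal notes]".toList
      (pvRepC "## Common errors and how to fix them".toList "## Common errors and how to fix them [internal notes]".toList
      (pvRepC "## Tested version matrix".toList "## Tested version matrix [field experience]".toList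
      (pvRepC "## Known issues and workarounds".toList "## Known issues and workarounds [internal notes]".toList
      (pvRepC "## Common failure modes".toList "## Common failure modes [field experience]".toList
      (pvRepC "## Head-to-head feature comparison".toList "## Head-to-head feature comparison [internal notes]".toList l))))))) := by
  rw [← pvScan_nil_rules (pvRepC "## Implementation guidelines and failure modes".toList _ _)]
  rw [pvFuse (by decide) (by decide)]
  rw [pvFuse (by decide) (by decide)]
  rw [pvFuse (by decide) (by decide)]
  rw [pvFuse (by decide) (by decide)]
  rw [pvFuse (by decide) (by decide)]
  rw [pvFuse (by decide) (by decide)]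
  rw [pvFuse (by decide) (by decide)]
  rw [pvFuse (by decide) (by decide)]
  rfl

-- ===== VERDICT (by name: the statement is the Claim_ definition above) =====
theorem add_inline_citations_py_spec : Claim_equal_add_inline_citations_py := by
  intro content _
  unfold Spec_add_inline_citations_py add_inline_citations_py add_inline_citations_py_alt
  apply String.toList_inj.mp
  simp only [PySem.Str.toList_replace, String.toList_ofList]
  rw [pvChain]
  rw [pvRepC_eq _ _ (by decide), pvRepC_eq _ _ (by decide), pvRepC_eq _ _ (by decide),
      pvRepC_eq _ _ (by decide), pvRepC_eq _ _ (by decide), pvRepC_eq _ _ (by decide),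
      pvRepC_eq _ _ (by decide), pvRepC_eq _ _ (by decide)]
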